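-- pv_equiv track=rewrite | github.com/EliteaAI/deepwiki_plugin | plugin_implementation/code_graph/graph_builder.py | _is_java_standard_library_reference
-- ===== SOURCE A (Python) =====
-- def _is_java_standard_library_reference(target_symbol: str, target_node: str) -> bool:
--     """Check if a target symbol/node references Java standard library."""
--     if not target_symbol:
--         return False
--
--     # Check for fully qualified Java standard library packages
--     java_std_packages = {
--         'java.lang',
--         'java.util',
--         'java.io',
--         'java.nio',
--         'java.time',
--         'java.math',
--         'java.net',
--         'java.text',
--         'java.util.regex',
--         'java.util.concurrent',
--         'java.util.function',
--         'java.util.stream',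
--         'java.security',
--         'java.awt',
--         'javax.swing',
--         'javax.annotation'
--     }
--
--     # Check if it's a fully qualified Java standard library type
--     if '.' in target_symbol:
--         for package in java_std_packages:
--             if target_symbol.startswith(package + '.'):
--                 return True
--
--     # Check for common built-in methods on standard library types
--     builtin_methods = {
--         'isEmpty', 'trim', 'length', 'contains', 'add', 'remove', 'get', 'set',
--         'toString', 'equals', 'hashCode', 'getClass', 'format', 'valueOf',
--         'randomUUID', 'now', 'hash', 'compile', 'matches', 'matcher',
--         'orElseThrow', 'isPresent', 'of', 'empty'
--     }
--
--     # Check if the target symbol is a method call on a standard library type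
--     if '.' in target_symbol:
--         method_name = target_symbol.split('.')[-1]
--         if method_name in builtin_methods:
--             return True
--
--     return False
-- ===== SOURCE B (Python) =====
-- _JAVA_STD_PACKAGES = frozenset({
--     'java.lang', 'java.util', 'java.io', 'java.nio', 'java.time', 'java.math',
--     'java.net', 'java.text', 'java.util.regex', 'java.util.concurrent',
--     'java.util.function', 'java.util.stream', 'java.security', 'java.awt',
--     'javax.swing', 'javax.annotation'
-- })
--
-- _BUILTIN_METHODS = frozenset({
--     'isEmpty', 'trim', 'length', 'contains', 'add', 'remove', 'get', 'set',
--     'toString', 'equals', 'hashCode', 'getClass', 'format', 'valueOf',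
--     'randomUUID', 'now', 'hash', 'compile', 'matches', 'matcher',
--     'orElseThrow', 'isPresent', 'of', 'empty'
-- })
--
--
-- def _is_java_standard_library_reference(target_symbol: str, target_node: str) -> bool:
--     """Check if a target symbol/node references Java standard library."""
--     parts = target_symbol.split('.')
--     if len(parts) < 2:
--         return False
--     # Grow the dotted prefix component by component and look it up in the
--     # package set (hash lookups on symbol prefixes instead of scanning the
--     # package set with startswith); the prefix is only tested while at least
--     # one component remains, matching startswith(package + '.').
--     prefix = parts[0]
--     for part in parts[1:]:
--         if prefix in _JAVA_STD_PACKAGES: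
--             return True
--         prefix = prefix + '.' + part
--     return parts[-1] in _BUILTIN_METHODS
-- ===== Notes on version B (the rewrite author's own statement) =====
-- stated objective: alternative
-- what changed: B splits the symbol on '.' once and grows the dotted prefix component by component, looking each prefix up in the package hash set, instead of A's scan over the 16-package set with startswith tests; the last split component reuses the same pass's parts list.
import Mathlib
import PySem

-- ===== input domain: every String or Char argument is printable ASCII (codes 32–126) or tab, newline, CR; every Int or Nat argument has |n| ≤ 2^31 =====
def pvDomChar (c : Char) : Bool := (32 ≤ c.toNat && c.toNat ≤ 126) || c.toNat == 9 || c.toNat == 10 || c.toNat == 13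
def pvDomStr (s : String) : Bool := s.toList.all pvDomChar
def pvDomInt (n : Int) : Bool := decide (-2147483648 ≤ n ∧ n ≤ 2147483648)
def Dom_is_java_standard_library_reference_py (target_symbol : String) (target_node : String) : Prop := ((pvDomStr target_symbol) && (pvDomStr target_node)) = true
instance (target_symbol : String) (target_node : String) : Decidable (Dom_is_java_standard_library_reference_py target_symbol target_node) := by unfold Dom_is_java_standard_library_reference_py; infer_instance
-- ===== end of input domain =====

-- B splits the symbol on '.' once and grows the dotted prefix component by component,
-- looking each prefix up in the package set, instead of A's startswith scan over the
-- package set; same return value everywhere (alternative decomposition, no speed claim).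

-- ===== PORT A =====

def pvJavaStdPackages : List (List Char) :=
  ["java.lang".toList, "java.util".toList, "java.io".toList, "java.nio".toList,
   "java.time".toList, "java.math".toList, "java.net".toList, "java.text".toList,
   "java.util.regex".toList, "java.util.concurrent".toList, "java.util.function".toList,
   "java.util.stream".toList, "java.security".toList, "java.awt".toList,
   "javax.swing".toList, "javax.annotation".toList]

def pvBuiltinMethods : List (List Char) :=
  ["isEmpty".toList, "trim".toList, "length".toList, "contains".toList, "add".toList,
   "remove".toList, "get".toList, "set".toList, "toString".toList, "equals".toList,
   "hashCode".toList, "getClass".toList, "format".toList, "valueOf".toList,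
   "randomUUID".toList, "now".toList, "hash".toList, "compile".toList, "matches".toList,
   "matcher".toList, "orElseThrow".toList, "isPresent".toList, "of".toList, "empty".toList]

-- A's for-loop over the package set: True on the first startswith(package + '.') hit
-- (the loop's value is order-independent, so iterating the literal order is exact)
def pvPkgScan (s : List Char) : List (List Char) → Bool
  | [] => false
  | p :: rest => if PySem.Chars.startswith s (p ++ ['.']) then true else pvPkgScan s rest

def is_java_standard_library_reference_py (target_symbol : String) (target_node : String) : Bool :=
  if target_symbol.toList = [] then false
  else if PySem.Chars.isIn ['.'] target_symbol.toList
          && pvPkgScan target_symbol.toList pvJavaStdPackages then true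
  else if PySem.Chars.isIn ['.'] target_symbol.toList then
    -- method_name = target_symbol.split('.')[-1]; method_name in builtin_methods
    match PySem.List.pyGet? (PySem.Chars.splitOn target_symbol.toList ['.']) (-1) with
    | some m => pvBuiltinMethods.contains m
    | none => false
  else false

-- ===== PORT B =====

-- Source B's loop: test the growing dotted prefix against the package set while at
-- least one component remains, then extend it by '.' + part
def pvPrefixLoop (P : List (List Char)) : List Char → List (List Char) → Bool
  | _, [] => false
  | pref, q :: qs => if P.contains pref then true else pvPrefixLoop P (pref ++ '.' :: q) qs

def is_java_standard_library_reference_py_alt (target_symbol : String) (target_node : String) : Bool :=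
  match PySem.Chars.splitOn target_symbol.toList ['.'] with
  | [] => false          -- unreachable: split never returns an empty list
  | [_] => false         -- len(parts) < 2
  | p :: rest =>
    if pvPrefixLoop pvJavaStdPackages p rest then true
    else pvBuiltinMethods.contains (rest.getLastD p)   -- parts[-1] of the nonempty list

-- ===== PRECONDITION & SPEC =====
def Spec_is_java_standard_library_reference_py (target_symbol : String) (target_node : String) (out : Bool) : Prop := out = is_java_standard_library_reference_py_alt target_symbol target_node
instance (target_symbol : String) (target_node : String) (out : Bool) : Decidable (Spec_is_java_standard_library_reference_py target_symbol target_node out) := by unfold Spec_is_java_standard_library_reference_py; infer_instance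

-- ===== CLAIM (what is proved, stated in full; the proofs are below) =====
def Claim_equal_is_java_standard_library_reference_py : Prop := ∀ (target_symbol : String) (target_node : String), Dom_is_java_standard_library_reference_py target_symbol target_node → Spec_is_java_standard_library_reference_py target_symbol target_node (is_java_standard_library_reference_py target_symbol target_node)

-- ===== LEMMAS AND PROOFS =====

-- reference split on '.' (structural recursion), and the dotted tail-join
def pvSplit : List Char → List (List Char)
  | [] => [[]]
  | c :: t =>
    if c = '.' then [] :: pvSplit t
    else match pvSplit t with
      | [] => [[c]]
      | p :: ps => (c :: p) :: ps

def pvJ (l : List (List Char)) : List Char := (l.map (fun q => '.' :: q)).flatten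

theorem pvJ_nil : pvJ [] = [] := rfl

theorem pvJ_cons (r : List Char) (rs : List (List Char)) :
    pvJ (r :: rs) = '.' :: (r ++ pvJ rs) := by simp [pvJ]

theorem pvJ_append (a b : List (List Char)) : pvJ (a ++ b) = pvJ a ++ pvJ b := by
  simp [pvJ]

theorem pvSplit_ne_nil (s : List Char) : pvSplit s ≠ [] := by
  cases s with
  | nil => simp [pvSplit]
  | cons c t =>
    simp only [pvSplit]
    split_ifs
    · simp
    · split <;> simp

theorem pvGo_spec : ∀ (fuel : Nat) (l cur : List Char) (acc : List (List Char)),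
    l.length < fuel →
    PySem.Chars.splitOn.go ['.'] fuel l cur acc =
      acc.reverse ++ (match pvSplit l with
        | [] => []
        | p :: ps => (cur.reverse ++ p) :: ps) := by
  intro fuel
  induction fuel with
  | zero => intro l cur acc h; omega
  | succ n ih =>
    intro l cur acc h
    cases l with
    | nil =>
      simp [PySem.Chars.splitOn.go, pvSplit]
    | cons c rest =>
      rw [PySem.Chars.splitOn.go]
      by_cases hc : c = '.'
      · subst hc
        have hpre : List.isPrefixOf ['.'] ('.' :: rest) = true := by simp [List.isPrefixOf]
        rw [if_pos hpre]
        rw [ih _ _ _ (by simp at h ⊢; omega)]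
        have hne := pvSplit_ne_nil rest
        cases hsp : pvSplit rest with
        | nil => exact absurd hsp hne
        | cons p ps =>
          simp [pvSplit, hsp, List.reverse_cons, List.append_assoc]
      · have hpre : List.isPrefixOf ['.'] (c :: rest) = false := by
          simp [List.isPrefixOf]
          exact fun hcc => (hc hcc.symm).elim
        rw [if_neg (by simp [hpre])]
        rw [ih _ _ _ (by simp at h ⊢; omega)]
        have hne := pvSplit_ne_nil rest
        cases hsp : pvSplit rest with
        | nil => exact absurd hsp hne
        | cons p ps =>
          simp [pvSplit, hc, hsp, List.reverse_cons, List.append_assoc]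

theorem pvSplitOn_eq (s : List Char) : PySem.Chars.splitOn s ['.'] = pvSplit s := by
  unfold PySem.Chars.splitOn
  rw [pvGo_spec (s.length + 1) s [] [] (by omega)]
  have hne := pvSplit_ne_nil s
  cases hsp : pvSplit s with
  | nil => exact absurd hsp hne
  | cons p ps => simp

-- pvSplit s = p :: rest with s = p ++ pvJ rest and all parts dot-free
theorem pvSplit_struct (s : List Char) :
    ∃ p rest, pvSplit s = p :: rest ∧ s = p ++ pvJ rest ∧ (∀ q ∈ p :: rest, '.' ∉ q) := by
  induction s with
  | nil => exact ⟨[], [], rfl, rfl, by simp⟩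
  | cons c t ih =>
    obtain ⟨p, rest, hsp, hjoin, hfree⟩ := ih
    by_cases hc : c = '.'
    · subst hc
      refine ⟨[], p :: rest, by simp [pvSplit, hsp], ?_, ?_⟩
      · rw [pvJ_cons, ← hjoin]; rfl
      · intro q hq
        rcases List.mem_cons.mp hq with rfl | hq'
        · simp
        · exact hfree q hq'
    · have hstep : pvSplit (c :: t) = (c :: p) :: rest := by
        simp only [pvSplit, if_neg hc]
        rw [hsp]
      refine ⟨c :: p, rest, hstep, by simp [hjoin], ?_⟩
      intro q hq
      rcases List.mem_cons.mp hq with rfl | hq'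
      · intro hmem
        rcases List.mem_cons.mp hmem with h1 | h2
        · exact hc h1.symm
        · exact hfree p (List.mem_cons_self ..) h2
      · exact hfree q (List.mem_cons_of_mem _ hq')

-- A's package loop hits iff some listed package followed by '.' is a prefix of s
theorem pvPkgScan_eq_true_iff (s : List Char) (P : List (List Char)) :
    pvPkgScan s P = true ↔ ∃ p ∈ P, p ++ ['.'] <+: s := by
  induction P with
  | nil => simp [pvPkgScan]
  | cons p rest ih =>
    simp only [pvPkgScan]
    split_ifs with h
    · simp only [true_iff]
      exact ⟨p, List.mem_cons_self .., (PySem.Chars.startswith_iff _ _).mp h⟩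
    · rw [ih]
      constructor
      · rintro ⟨q, hq, hpre⟩; exact ⟨q, List.mem_cons_of_mem _ hq, hpre⟩
      · rintro ⟨q, hq, hpre⟩
        rcases List.mem_cons.mp hq with rfl | hq'
        · exact absurd ((PySem.Chars.startswith_iff _ _).mpr hpre) (by simp [h])
        · exact ⟨q, hq', hpre⟩

-- B's loop hits iff some cumulative dotted prefix (with a component remaining) is in P
theorem pvPrefixLoop_iff (P : List (List Char)) (qs : List (List Char)) :
    ∀ pref, pvPrefixLoop P pref qs = true ↔ ∃ j < qs.length, pref ++ pvJ (qs.take j) ∈ P := by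
  induction qs with
  | nil => intro pref; simp [pvPrefixLoop]
  | cons q t ih =>
    intro pref
    simp only [pvPrefixLoop]
    split_ifs with h
    · simp only [true_iff]
      exact ⟨0, by simp, by simpa [pvJ] using List.contains_iff_mem.mp h⟩
    · rw [ih]
      constructor
      · rintro ⟨j, hj, hmem⟩
        refine ⟨j + 1, by simpa using hj, ?_⟩
        simpa [pvJ, List.append_assoc] using hmem
      · rintro ⟨j, hj, hmem⟩
        cases j with
        | zero =>
          exfalso
          simp only [List.take_zero, pvJ_nil, List.append_nil] at hmem
          exact absurd (List.contains_iff_mem.mpr hmem) h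
        | succ j' =>
          refine ⟨j', by simpa using hj, ?_⟩
          simpa [pvJ, List.append_assoc] using hmem

-- every '.' in p ++ pvJ rest with dot-free rest sits either inside p or at a prefix boundary
theorem pvDotPos (rest : List (List Char)) :
    ∀ (p : List Char), (∀ q ∈ rest, '.' ∉ q) →
    ∀ (k : Nat), (p ++ pvJ rest)[k]? = some '.' →
      p[k]? = some '.' ∨ ∃ j < rest.length, k = (p ++ pvJ (rest.take j)).length := by
  induction rest with
  | nil =>
    intro p _ k hdot
    left
    simpa [pvJ_nil] using hdot
  | cons r rs ih =>
    intro p hfree k hdot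
    have hdot' : ((p ++ '.' :: r) ++ pvJ rs)[k]? = some '.' := by
      rw [List.append_assoc, List.cons_append]
      rw [pvJ_cons] at hdot
      exact hdot
    by_cases h1 : k < p.length
    · left
      rw [pvJ_cons] at hdot
      rwa [List.getElem?_append_left h1] at hdot
    · by_cases h2 : k = p.length
      · right
        exact ⟨0, by simp, by simp [h2, pvJ_nil]⟩
      · by_cases h3 : k < p.length + 1 + r.length
        · exfalso
          rw [List.getElem?_append_left (by simp; omega)] at hdot'
          rw [List.getElem?_append_right (by omega)] at hdot'
          have hidx : k - p.length = (k - p.length - 1) + 1 := by omega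
          rw [hidx] at hdot'
          simp only [List.getElem?_cons_succ] at hdot'
          exact hfree r (List.mem_cons_self ..) (List.mem_of_getElem? hdot')
        · rcases ih (p ++ '.' :: r) (fun q hq => hfree q (List.mem_cons_of_mem _ hq)) k hdot' with
            hin | ⟨j, hj, hkeq⟩
          · exfalso
            have := List.mem_of_getElem? hin
            have hlt : k < (p ++ '.' :: r).length := (List.getElem?_eq_some_iff.mp hin).1
            simp at hlt
            omega
          · right
            refine ⟨j + 1, by simpa using hj, ?_⟩
            rw [hkeq]
            simp [pvJ_cons, List.append_assoc]

-- the bridge: given the dot-free split s = p ++ pvJ rest, A's package condition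
-- equals B's cumulative-prefix condition
theorem pvBridge2 (p : List Char) (rest : List (List Char)) (P : List (List Char))
    (hfree : ∀ q ∈ p :: rest, '.' ∉ q) :
    (∃ pkg ∈ P, pkg ++ ['.'] <+: p ++ pvJ rest) ↔
    ∃ j < rest.length, p ++ pvJ (rest.take j) ∈ P := by
  constructor
  · rintro ⟨pkg, hpkg, t, ht⟩
    have hdot? : (p ++ pvJ rest)[pkg.length]? = some '.' := by
      rw [← ht, List.append_assoc, List.getElem?_append_right (by omega)]
      simp
    rcases pvDotPos rest p (fun q hq => hfree q (List.mem_cons_of_mem _ hq)) pkg.length hdot? with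
      hin | ⟨j, hj, hkeq⟩
    · exact absurd (List.mem_of_getElem? hin) (hfree p (List.mem_cons_self ..))
    · refine ⟨j, hj, ?_⟩
      have hpre : p ++ pvJ (rest.take j) <+: p ++ pvJ rest := by
        refine ⟨pvJ (rest.drop j), ?_⟩
        rw [List.append_assoc, ← pvJ_append, List.take_append_drop]
      have hpre' : pkg <+: p ++ pvJ rest := ⟨['.'] ++ t, by rw [← ht, List.append_assoc]⟩
      have e1 : pkg = (p ++ pvJ rest).take pkg.length := List.prefix_iff_eq_take.mp hpre'
      have e2 : p ++ pvJ (rest.take j) =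
          (p ++ pvJ rest).take (p ++ pvJ (rest.take j)).length := List.prefix_iff_eq_take.mp hpre
      have : pkg = p ++ pvJ (rest.take j) := by rw [e1, hkeq, ← e2]
      exact this ▸ hpkg
  · rintro ⟨j, hj, hmem⟩
    refine ⟨p ++ pvJ (rest.take j), hmem, ?_⟩
    have hne : rest.drop j ≠ [] := by simp; omega
    cases hdrop : rest.drop j with
    | nil => exact absurd hdrop hne
    | cons r rs' =>
      refine ⟨r ++ pvJ rs', ?_⟩
      have hre : pvJ rest = pvJ (rest.take j) ++ pvJ (rest.drop j) := by
        rw [← pvJ_append, List.take_append_drop]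
      rw [hre, hdrop, pvJ_cons]
      simp [List.append_assoc]

-- '.' occurs in s = p ++ pvJ rest (dot-free parts) iff rest is nonempty
theorem pvDotIn (p : List Char) (rest : List (List Char)) (hfree : ∀ q ∈ p :: rest, '.' ∉ q) :
    PySem.Chars.isIn ['.'] (p ++ pvJ rest) = true ↔ rest ≠ [] := by
  rw [PySem.Chars.isIn_iff_infix]
  constructor
  · intro hinf hnil
    subst hnil
    have : '.' ∈ p := by
      have hmem : '.' ∈ p ++ pvJ ([] : List (List Char)) := hinf.subset (by simp)
      simpa [pvJ_nil] using hmem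
    exact hfree p (List.mem_cons_self ..) this
  · intro hne
    cases rest with
    | nil => exact absurd rfl hne
    | cons r rs =>
      have hmem : '.' ∈ p ++ pvJ (r :: rs) := by simp [pvJ_cons]
      obtain ⟨u, v, huv⟩ := List.append_of_mem hmem
      exact ⟨u, v, by rw [huv]; simp⟩

-- xs[-1] of a nonempty list
theorem pvGetLastAux : ∀ (rest : List (List Char)) (p : List Char),
    (p :: rest)[rest.length]'(by simp) = rest.getLast?.getD p
  | [], _ => rfl
  | r :: rs, p => by
    simp only [List.length_cons, List.getElem_cons_succ]
    refine (pvGetLastAux rs r).trans ?_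
    cases rs with
    | nil => simp
    | cons b bs =>
      simp only [List.getLast?_cons_cons]
      cases h : (b :: bs).getLast? with
      | none => simp [List.getLast?_eq_none_iff] at h
      | some x => simp

theorem pvGetNegOne (p : List Char) (rest : List (List Char)) :
    PySem.List.pyGet? (p :: rest) (-1) = some (rest.getLastD p) := by
  simp [PySem.List.pyGet?, PySem.List.pyIdx?]
  rw [pvGetLastAux rest p]

-- ===== VERDICT =====
theorem is_java_standard_library_reference_py_spec : Claim_equal_is_java_standard_library_reference_py := by
  intro ts tn _
  unfold Spec_is_java_standard_library_reference_py
  unfold is_java_standard_library_reference_py is_java_standard_library_reference_py_alt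
  obtain ⟨p, rest, hsp, hjoin, hfree⟩ := pvSplit_struct ts.toList
  rw [pvSplitOn_eq, hsp, hjoin]
  cases rest with
  | nil =>
    have hdot : PySem.Chars.isIn ['.'] p = false := by
      have h := pvDotIn p [] hfree
      simp [pvJ_nil] at h
      exact h
    simp [pvJ_nil, hdot]
  | cons r rs =>
    have hne : p ++ pvJ (r :: rs) ≠ [] := by simp [pvJ_cons]
    have hdot : PySem.Chars.isIn ['.'] (p ++ pvJ (r :: rs)) = true :=
      (pvDotIn p (r :: rs) hfree).mpr (by simp)
    rw [if_neg hne, hdot]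
    have hscan : pvPkgScan (p ++ pvJ (r :: rs)) pvJavaStdPackages
        = pvPrefixLoop pvJavaStdPackages p (r :: rs) := by
      rw [Bool.eq_iff_iff, pvPkgScan_eq_true_iff, pvPrefixLoop_iff]
      exact pvBridge2 p (r :: rs) _ hfree
    rw [hscan]
    cases hloop : pvPrefixLoop pvJavaStdPackages p (r :: rs) with
    | true => simp [hloop]
    | false => simp [hloop, pvGetNegOne]
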